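-- pv_equiv track=rewrite | github.com/y10ab1/Leetcode | my-folder/problems/maximum_score_from_performing_multiplication_operations/solution.py | maximumScore
-- ===== SOURCE A (Python) =====
-- from typing import List
--
-- def maximumScore(nums: List[int], multipliers: List[int]) -> int:
--     m = len(multipliers)
--     n = len(nums)
--
--     dp = [[0]*(m+1) for _ in range(m+1)]
--
--     for i in range(m-1,-1,-1):
--         for j in range(i,-1,-1):
--             mul = multipliers[i]
--             l_n = nums[j]
--             r_n = nums[n-1-(i-j)]
--             dp[i][j] = max(l_n*mul+dp[i+1][j+1], r_n*mul+dp[i+1][j])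
--     return dp[0][0]
-- ===== SOURCE B (Python) =====
-- from typing import List
--
-- def maximumScore(nums: List[int], multipliers: List[int]) -> int:
--     # Top-down recursion producing one DP row at a time: row(i)[j] is the best
--     # score obtainable from operation i onward having already taken j elements
--     # from the left.  No 2-D table: each row is built from the next row only.
--     m = len(multipliers)
--     n = len(nums)
--
--     def row(i: int) -> List[int]:
--         if i == m:
--             return [0] * (m + 1)
--         r = row(i + 1)
--         mul = multipliers[i]
--         return [max(nums[j] * mul + r[j + 1], nums[n - 1 - (i - j)] * mul + r[j])
--                 for j in range(i + 1)]
--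
--     return row(0)[0]
-- ===== Notes on version B (the rewrite author's own statement) =====
-- stated objective: alternative
-- what changed: A fills a mutable (m+1)x(m+1) table bottom-up with nested index loops; B computes the same DP by top-down structural recursion that builds one immutable row per level from the next row only (no 2-D table, O(m) live memory).
import Mathlib
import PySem

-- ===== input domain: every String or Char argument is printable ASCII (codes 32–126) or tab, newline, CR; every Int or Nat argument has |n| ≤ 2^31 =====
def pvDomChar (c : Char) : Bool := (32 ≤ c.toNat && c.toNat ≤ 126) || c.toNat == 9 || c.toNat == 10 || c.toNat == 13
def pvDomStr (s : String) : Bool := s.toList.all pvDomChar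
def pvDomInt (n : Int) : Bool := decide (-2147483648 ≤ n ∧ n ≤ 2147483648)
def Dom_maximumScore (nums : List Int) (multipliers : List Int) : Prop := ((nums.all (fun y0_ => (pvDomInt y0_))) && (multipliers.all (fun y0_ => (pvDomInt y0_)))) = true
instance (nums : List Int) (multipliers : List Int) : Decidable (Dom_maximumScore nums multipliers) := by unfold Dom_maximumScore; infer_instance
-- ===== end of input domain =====

-- B replaces A's in-place (m+1)×(m+1) table fill with a top-down recursion that
-- builds one DP row at a time from the next row (alternative decomposition, O(m) space).


-- ===== PORT A =====
-- Literal transliteration of A: dp is the (m+1)×(m+1) table, written in place,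
-- i runs m-1..0 (range(m-1,-1,-1) = (List.range m).reverse), j runs i..0.
-- Under Pre_ (m ≤ n) every Python index is in range and nonnegative, so
-- List.getD / Nat subtraction are exact there.
def maximumScore (nums : List Int) (multipliers : List Int) : Int :=
  let m := multipliers.length
  let n := nums.length
  let dp0 : List (List Int) := (List.range (m+1)).map (fun _ => List.replicate (m+1) (0:Int))
  let dp := ((List.range m).reverse).foldl (fun dp i =>
      ((List.range (i+1)).reverse).foldl (fun dp j =>
        let mul := multipliers.getD i 0
        let l_n := nums.getD j 0
        let r_n := nums.getD (n - 1 - (i - j)) 0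
        dp.set i ((dp.getD i []).set j
          (max (l_n * mul + (dp.getD (i+1) []).getD (j+1) 0)
               (r_n * mul + (dp.getD (i+1) []).getD j 0)))) dp) dp0
  (dp.getD 0 []).getD 0 0

-- ===== PORT B =====
-- B's helper row(i); ported with the structural argument d = m - i (row i = rowB (m-i)),
-- the obvious structural form of B's recursion (base row(m) ↔ d = 0).
def rowB (nums multipliers : List Int) (n m : Nat) : Nat → List Int
  | 0 => List.replicate (m+1) (0:Int)
  | d+1 =>
    let i := m - d - 1
    let r := rowB nums multipliers n m d
    let mul := multipliers.getD i 0
    (List.range (i+1)).map (fun j =>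
      max (nums.getD j 0 * mul + r.getD (j+1) 0)
          (nums.getD (n - 1 - (i - j)) 0 * mul + r.getD j 0))

def maximumScore_alt (nums : List Int) (multipliers : List Int) : Int :=
  let m := multipliers.length
  let n := nums.length
  (rowB nums multipliers n m m).getD 0 0

-- ===== PRECONDITION & SPEC =====
-- Pre_ excludes exactly the inputs where Python A raises: whenever
-- len(multipliers) > len(nums), A's first inner step reads nums[m-1] with
-- m-1 ≥ n and raises IndexError (it never returns there).
def Pre_maximumScore (nums : List Int) (multipliers : List Int) : Prop :=
  multipliers.length ≤ nums.length
instance (nums : List Int) (multipliers : List Int) : Decidable (Pre_maximumScore nums multipliers) := by unfold Pre_maximumScore; infer_instance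

def pvWitness_maximumScore : List Int × List Int := ([1, 2, 3], [3, 2])

def Spec_maximumScore (nums : List Int) (multipliers : List Int) (out : Int) : Prop := out = maximumScore_alt nums multipliers
instance (nums : List Int) (multipliers : List Int) (out : Int) : Decidable (Spec_maximumScore nums multipliers out) := by unfold Spec_maximumScore; infer_instance

-- ===== CLAIM (what is proved, stated in full; the proofs are below) =====
def Claim_equal_maximumScore : Prop := ∀ (nums : List Int) (multipliers : List Int), Dom_maximumScore nums multipliers → Pre_maximumScore nums multipliers → Spec_maximumScore nums multipliers (maximumScore nums multipliers)

-- ===== LEMMAS AND PROOFS =====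

-- gB i j = B's row(i)[j] (read with default 0).
def gB (nums multipliers : List Int) (n m i j : Nat) : Int :=
  (rowB nums multipliers n m (m - i)).getD j 0

-- table read with defaults, matching the getD chain in port A
def tread (T : List (List Int)) (k j : Nat) : Int := (T.getD k []).getD j 0

lemma gB_last (nums multipliers : List Int) (n m j : Nat) :
    gB nums multipliers n m m j = 0 := by
  simp [gB, rowB, List.getD]

lemma gB_step (nums multipliers : List Int) (n m i j : Nat) (hi : i < m) (hj : j ≤ i) :
    gB nums multipliers n m i j =
      max (nums.getD j 0 * multipliers.getD i 0 + gB nums multipliers n m (i+1) (j+1))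
          (nums.getD (n - 1 - (i - j)) 0 * multipliers.getD i 0 + gB nums multipliers n m (i+1) j) := by
  have h1 : m - i = (m - (i+1)) + 1 := by omega
  have h2 : m - (m - (i+1)) - 1 = i := by omega
  rw [gB, h1, rowB]
  simp only [h2]
  rw [PySem.List.getD_map_range _ _ _ _ (by omega)]
  rfl


-- invariant carried by the fold proofs
def TInv (nums multipliers : List Int) (n m t : Nat) (T : List (List Int)) : Prop :=
  T.length = m + 1 ∧ (∀ r ∈ T, r.length = m + 1) ∧
  (∀ k j, t ≤ k → k ≤ m → j ≤ k → tread T k j = gB nums multipliers n m k j)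

lemma inner_fold (nums multipliers : List Int) (n m i : Nat) (hi : i < m) :
    ∀ (t : Nat) (T : List (List Int)), t ≤ i + 1 →
      T.length = m + 1 → (∀ r ∈ T, r.length = m + 1) →
      (∀ j, j ≤ i + 1 → tread T (i+1) j = gB nums multipliers n m (i+1) j) →
      (let T' := ((List.range t).reverse).foldl (fun dp j =>
        dp.set i ((dp.getD i []).set j
          (max (nums.getD j 0 * multipliers.getD i 0 + (dp.getD (i+1) []).getD (j+1) 0)
               (nums.getD (n - 1 - (i - j)) 0 * multipliers.getD i 0 + (dp.getD (i+1) []).getD j 0)))) T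
       T'.length = m + 1 ∧ (∀ r ∈ T', r.length = m + 1) ∧
       (∀ k j, k ≠ i → tread T' k j = tread T k j) ∧
       (∀ j, j < t → tread T' i j = gB nums multipliers n m i j) ∧
       (∀ j, t ≤ j → tread T' i j = tread T i j)) := by
  intro t
  induction t with
  | zero =>
    intro T _ hlen hrows _ T'
    have hT' : T' = T := by simp [T']
    simp only [hT']
    refine ⟨hlen, hrows, ?_, ?_, ?_⟩
    · intro k j _; trivial
    · intro j hj; omega
    · intro j _; trivial
  | succ t ih =>
    intro T ht hlen hrows hrow1 T'
    have hiT : i < T.length := by omega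
    have hgetD : T.getD i [] = T[i] := List.getD_eq_getElem T [] hiT
    have hrowi_len : (T.getD i []).length = m + 1 := by
      rw [hgetD]; exact hrows _ (List.getElem_mem hiT)
    have hTi_len : T[i].length = m + 1 := by rw [← hgetD]; exact hrowi_len
    set v := (max (nums.getD t 0 * multipliers.getD i 0 + (T.getD (i+1) []).getD (t+1) 0)
               (nums.getD (n - 1 - (i - t)) 0 * multipliers.getD i 0 + (T.getD (i+1) []).getD t 0)) with hv
    set T1 := T.set i ((T.getD i []).set t v) with hT1
    have hlen1 : T1.length = m + 1 := by simp [hT1, hlen]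
    have hrows1 : ∀ r ∈ T1, r.length = m + 1 := by
      intro r hr
      rcases List.mem_or_eq_of_mem_set hr with h | h
      · exact hrows r h
      · subst h; rw [List.length_set]; exact hrowi_len
    have hne : ∀ k j, k ≠ i → tread T1 k j = tread T k j := by
      intro k j hk
      simp [tread, hT1, List.getD_eq_getElem?_getD, Ne.symm hk]
    have heq_t : tread T1 i t = v := by
      simp [tread, hT1, List.getD_eq_getElem?_getD, hiT,
        show t < T[i].length by omega]
    have heq_ne : ∀ j, j ≠ t → tread T1 i j = tread T i j := by
      intro j hj
      simp [tread, hT1, List.getD_eq_getElem?_getD, hiT, Ne.symm hj]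
    have hvg : v = gB nums multipliers n m i t := by
      have h1 := hrow1 (t+1) (by omega)
      have h2 := hrow1 t (by omega)
      simp only [tread] at h1 h2
      rw [gB_step nums multipliers n m i t hi (by omega), hv, h1, h2]
    have hrow1' : ∀ j, j ≤ i + 1 → tread T1 (i+1) j = gB nums multipliers n m (i+1) j := by
      intro j hj; rw [hne _ _ (by omega)]; exact hrow1 j hj
    obtain ⟨l2, r2, ne2, lt2, ge2⟩ := ih T1 (by omega) hlen1 hrows1 hrow1'
    have hT' : T' = ((List.range t).reverse).foldl (fun dp j =>
        dp.set i ((dp.getD i []).set j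
          (max (nums.getD j 0 * multipliers.getD i 0 + (dp.getD (i+1) []).getD (j+1) 0)
               (nums.getD (n - 1 - (i - j)) 0 * multipliers.getD i 0 + (dp.getD (i+1) []).getD j 0)))) T1 := by
      simp [T', T1, List.range_succ, hv]
    simp only [hT']
    refine ⟨l2, r2, ?_, ?_, ?_⟩
    · intro k j hk; rw [ne2 k j hk]; exact hne k j hk
    · intro j hj
      rcases Nat.lt_or_ge j t with h | h
      · exact lt2 j h
      · have hjt : j = t := by omega
        subst hjt
        rw [ge2 j (le_refl _), heq_t, hvg]
    · intro j hj
      rw [ge2 j (by omega), heq_ne j (by omega)]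


lemma outer_fold (nums multipliers : List Int) (n m : Nat) :
    ∀ (t : Nat) (T : List (List Int)), t ≤ m →
      TInv nums multipliers n m t T →
      TInv nums multipliers n m 0
        (((List.range t).reverse).foldl (fun dp i =>
          ((List.range (i+1)).reverse).foldl (fun dp j =>
            dp.set i ((dp.getD i []).set j
              (max (nums.getD j 0 * multipliers.getD i 0 + (dp.getD (i+1) []).getD (j+1) 0)
                   (nums.getD (n - 1 - (i - j)) 0 * multipliers.getD i 0 + (dp.getD (i+1) []).getD j 0)))) dp) T) := by
  intro t
  induction t with
  | zero =>
    intro T _ hInv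
    simpa using hInv
  | succ t ih =>
    intro T ht hInv
    obtain ⟨hlen, hrows, hread⟩ := hInv
    have hti : t < m := by omega
    obtain ⟨l1, r1, ne1, lt1, ge1⟩ :=
      inner_fold nums multipliers n m t hti (t+1) T (le_refl _) hlen hrows
        (fun j hj => hread (t+1) j (by omega) (by omega) hj)
    have step : TInv nums multipliers n m t
        (((List.range (t+1)).reverse).foldl (fun dp j =>
          dp.set t ((dp.getD t []).set j
            (max (nums.getD j 0 * multipliers.getD t 0 + (dp.getD (t+1) []).getD (j+1) 0)
                 (nums.getD (n - 1 - (t - j)) 0 * multipliers.getD t 0 + (dp.getD (t+1) []).getD j 0)))) T) := by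
      refine ⟨l1, r1, ?_⟩
      intro k j hk1 hk2 hj
      rcases Nat.eq_or_lt_of_le hk1 with h | h
      · subst h; exact lt1 j (by omega)
      · rw [ne1 k j (by omega)]; exact hread k j (by omega) hk2 hj
    have := ih _ (by omega) step
    simpa [List.range_succ] using this


-- ===== VERDICT (by name: the statement is the Claim_ definition above) =====
theorem maximumScore_spec : Claim_equal_maximumScore := by
  intro nums multipliers _ _
  unfold Spec_maximumScore
  set m := multipliers.length with hm
  set n := nums.length with hn
  have hInv0 : TInv nums multipliers n m m
      ((List.range (m+1)).map (fun _ => List.replicate (m+1) (0:Int))) := by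
    refine ⟨by simp, ?_, ?_⟩
    · intro r hr
      obtain ⟨a, _, rfl⟩ := List.mem_map.mp hr
      simp
    · intro k j hk1 hk2 _
      have hk : k = m := by omega
      subst hk
      rw [gB_last]
      simp [tread]
  obtain ⟨_, _, hread⟩ := outer_fold nums multipliers n m m
      ((List.range (m+1)).map (fun _ => List.replicate (m+1) (0:Int))) (le_refl _) hInv0
  have h00 := hread 0 0 (le_refl _) (Nat.zero_le _) (le_refl _)
  simp only [tread, gB, Nat.sub_zero] at h00
  simp only [maximumScore, maximumScore_alt, ← hm, ← hn]
  exact h00
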